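-- pv_equiv track=rewrite | github.com/langchain-ai/langchain | agents/seo_agent/outreach_strategy.py | get_outreach_progress
-- ===== SOURCE A (Python) =====
-- MONTHLY_OUTREACH_GOALS: dict[str, int] = {
--     "kitchen_bathroom_providers": 20,  # Partner embeds
--     "home_interior_bloggers": 15,      # Content collaborations
--     "home_improvement_influencers": 5,  # Influencer partnerships
--     "resource_page_targets": 10,       # Resource page inclusions
--     "pr_journalists": 5,              # PR/media outreach
--     "interior_designers": 15,          # Designer partnerships
-- }
--
-- def get_outreach_progress(communications: list[dict]) -> dict[str, dict[str, int]]: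
--     """Calculate outreach progress against monthly goals.
--
--     Returns progress per segment with sent, replied, and link_acquired counts.
--     """
--     progress: dict[str, dict[str, int]] = {}
--     for segment, goal in MONTHLY_OUTREACH_GOALS.items():
--         # Count comms that mention this segment in notes
--         relevant = [c for c in communications if segment in (c.get("notes", "") or "")]
--         progress[segment] = {
--             "goal": goal,
--             "sent": len([c for c in relevant if c.get("status") in ("sent", "opened", "replied")]),
--             "replied": len([c for c in relevant if c.get("status") == "replied"]),
--             "link_acquired": 0,  # Would need cross-reference with prospects
--         }
--     return progress
-- ===== SOURCE B (Python) =====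
-- MONTHLY_OUTREACH_GOALS: dict[str, int] = {
--     "kitchen_bathroom_providers": 20,
--     "home_interior_bloggers": 15,
--     "home_improvement_influencers": 5,
--     "resource_page_targets": 10,
--     "pr_journalists": 5,
--     "interior_designers": 15,
-- }
--
--
-- def get_outreach_progress(communications: list[dict]) -> dict[str, dict[str, int]]:
--     """Calculate outreach progress against monthly goals.
--
--     One pass flattens the communications into a multiset of (segment, is_reply)
--     events; the result dict is then produced by counting occurrences in that
--     event list, so no per-segment counters or filtered lists are maintained.
--     """
--     events: list[tuple[str, bool]] = []
--     for c in communications: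
--         notes = c.get("notes", "") or ""
--         status = c.get("status")
--         if status in ("sent", "opened", "replied"):
--             rep = status == "replied"
--             for seg in MONTHLY_OUTREACH_GOALS:
--                 if seg in notes:
--                     events.append((seg, rep))
--     return {
--         seg: {
--             "goal": goal,
--             "sent": events.count((seg, False)) + events.count((seg, True)),
--             "replied": events.count((seg, True)),
--             "link_acquired": 0,
--         }
--         for seg, goal in MONTHLY_OUTREACH_GOALS.items()
--     }
-- ===== Notes on version B (the rewrite author's own statement) =====
-- stated objective: alternative
-- what changed: A builds a filtered 'relevant' list per segment and rescans it per status (six filter passes over the communications); B flattens the communications in one pass into a multiset of (segment, is_reply) events and derives every count by counting occurrences in that event list, maintaining no per-segment filtered lists or counters.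
import Mathlib
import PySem

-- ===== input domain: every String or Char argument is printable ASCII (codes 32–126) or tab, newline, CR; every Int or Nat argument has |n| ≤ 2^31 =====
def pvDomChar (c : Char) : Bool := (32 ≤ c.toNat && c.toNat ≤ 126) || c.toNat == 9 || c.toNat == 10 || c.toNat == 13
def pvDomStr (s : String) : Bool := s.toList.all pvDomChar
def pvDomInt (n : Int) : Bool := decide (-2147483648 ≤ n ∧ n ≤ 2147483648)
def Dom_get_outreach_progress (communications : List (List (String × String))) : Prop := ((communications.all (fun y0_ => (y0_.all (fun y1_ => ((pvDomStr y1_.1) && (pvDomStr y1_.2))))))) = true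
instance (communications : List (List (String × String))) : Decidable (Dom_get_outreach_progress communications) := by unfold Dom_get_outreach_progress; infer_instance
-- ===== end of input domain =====

-- B replaces A's six filter-and-rescan passes by one pass that flattens the communications
-- into a multiset of (segment, is_reply) events and counts occurrences in it (objective: alternative).

-- ===== PORT A =====
-- module constant MONTHLY_OUTREACH_GOALS (insertion order kept)
def MONTHLY_OUTREACH_GOALS : List (String × Int) :=
  [("kitchen_bathroom_providers", 20), ("home_interior_bloggers", 15),
   ("home_improvement_influencers", 5), ("resource_page_targets", 10),
   ("pr_journalists", 5), ("interior_designers", 15)]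

-- c.get("notes", "") or ""   (values are str here, so `or ""` keeps "" as "" and anything else as itself)
def pyNotes (c : List (String × String)) : String :=
  let n := (PySem.Dict.mk c).getD "notes" ""
  if n == "" then "" else n

-- c.get("status")
def pyStatus (c : List (String × String)) : Option String := (PySem.Dict.mk c).get? "status"

-- status in ("sent", "opened", "replied")
def statusSentLike (st : Option String) : Bool :=
  st == some "sent" || st == some "opened" || st == some "replied"

def get_outreach_progress (communications : List (List (String × String))) : List (String × List (String × Int)) :=
  MONTHLY_OUTREACH_GOALS.foldl (fun progress sg =>
    let relevant := communications.filter (fun c => PySem.Str.isIn sg.1 (pyNotes c))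
    progress ++ [(sg.1,
      [("goal", sg.2),
       ("sent", ((relevant.filter (fun c => statusSentLike (pyStatus c))).length : Int)),
       ("replied", ((relevant.filter (fun c => pyStatus c == some "replied")).length : Int)),
       ("link_acquired", 0)])]) []

-- ===== PORT B =====
-- body of Source B's event-building loop, for one communication
def eventStep (ev : List (String × Bool)) (c : List (String × String)) : List (String × Bool) :=
  let notes := pyNotes c
  let status := pyStatus c
  if statusSentLike status then
    let rep := status == some "replied"
    (MONTHLY_OUTREACH_GOALS.map Prod.fst).foldl
      (fun ev seg => if PySem.Str.isIn seg notes then ev ++ [(seg, rep)] else ev) ev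
  else ev

def get_outreach_progress_alt (communications : List (List (String × String))) : List (String × List (String × Int)) :=
  let events := communications.foldl eventStep []
  MONTHLY_OUTREACH_GOALS.map (fun sg =>
    (sg.1, [("goal", sg.2),
            ("sent", (events.count (sg.1, false) : Int) + (events.count (sg.1, true) : Int)),
            ("replied", (events.count (sg.1, true) : Int)),
            ("link_acquired", 0)]))

-- ===== PRECONDITION & SPEC =====
def Spec_get_outreach_progress (communications : List (List (String × String))) (out : List (String × List (String × Int))) : Prop := out = get_outreach_progress_alt communications
instance (communications : List (List (String × String))) (out : List (String × List (String × Int))) : Decidable (Spec_get_outreach_progress communications out) := by unfold Spec_get_outreach_progress; infer_instance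

-- ===== CLAIM (what is proved, stated in full; the proofs are below) =====
def Claim_equal_get_outreach_progress : Prop := ∀ (communications : List (List (String × String))), Dom_get_outreach_progress communications → Spec_get_outreach_progress communications (get_outreach_progress communications)

-- ===== LEMMAS AND PROOFS =====

-- occurrences of (s, b) after one communication's inner pass over the segment names
theorem inner_count (P : String → Bool) (rep : Bool) (names : List String)
    (ev : List (String × Bool)) (s : String) (b : Bool) :
    (names.foldl (fun ev seg => if P seg then ev ++ [(seg, rep)] else ev) ev).count (s, b)
      = ev.count (s, b) + (if P s = true ∧ b = rep then names.count s else 0) := by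
  induction names generalizing ev with
  | nil => simp
  | cons a names ih =>
    simp only [List.foldl_cons]
    by_cases hp : P a = true
    · rw [if_pos hp, ih, List.count_append]
      have h1 : List.count (s, b) [(a, rep)] = if a = s ∧ b = rep then 1 else 0 := by
        by_cases ha : a = s <;> by_cases hb : b = rep <;>
          simp [ha, hb, List.count_cons, beq_iff_eq] <;>
          exact fun h => hb h.symm
      rw [h1, List.count_cons]
      split_ifs <;> simp_all [beq_iff_eq] <;> omega
    · rw [if_neg hp, ih, List.count_cons]
      by_cases ha : a = s
      · subst ha
        simp [hp]
      · have : (a == s) = false := by simp [beq_iff_eq, ha]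
        rw [this]
        simp

-- occurrences of (s, b) in the full event list built from the communications
theorem events_count (l : List (List (String × String))) (ev : List (String × Bool))
    (s : String) (b : Bool) :
    (l.foldl eventStep ev).count (s, b)
      = ev.count (s, b) + ((MONTHLY_OUTREACH_GOALS.map Prod.fst).count s)
          * l.countP (fun c => statusSentLike (pyStatus c) && PySem.Str.isIn s (pyNotes c)
                                && ((pyStatus c == some "replied") == b)) := by
  induction l generalizing ev with
  | nil => simp
  | cons c l ih =>
    simp only [List.foldl_cons, List.countP_cons]
    rw [ih]
    unfold eventStep
    by_cases hsl : statusSentLike (pyStatus c) = true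
    · rw [if_pos hsl, inner_count]
      by_cases hin : PySem.Str.isIn s (pyNotes c) = true
      · by_cases hb : b = (pyStatus c == some "replied")
        · have hpred : (statusSentLike (pyStatus c) && PySem.Str.isIn s (pyNotes c)
              && ((pyStatus c == some "replied") == b)) = true := by
            rw [hsl, hin, hb]; simp
          rw [if_pos ⟨hin, hb⟩, hpred]
          simp only [if_true]
          ring
        · have hpred : (statusSentLike (pyStatus c) && PySem.Str.isIn s (pyNotes c)
              && ((pyStatus c == some "replied") == b)) = false := by
            rcases Bool.eq_false_or_eq_true ((pyStatus c == some "replied") == b) with h | h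
            · exact absurd (eq_of_beq h).symm hb
            · rw [h]; simp
          rw [if_neg (fun hc => hb hc.2), hpred]
          simp only [Bool.false_eq_true, if_false]
          ring
      · have hpred : (statusSentLike (pyStatus c) && PySem.Str.isIn s (pyNotes c)
            && ((pyStatus c == some "replied") == b)) = false := by
          rcases Bool.eq_false_or_eq_true (PySem.Str.isIn s (pyNotes c)) with h | h
          · exact absurd h hin
          · rw [h]; simp
        rw [if_neg (fun hc => hin hc.1), hpred]
        simp only [Bool.false_eq_true, if_false]
        ring
    · have hpred : (statusSentLike (pyStatus c) && PySem.Str.isIn s (pyNotes c)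
          && ((pyStatus c == some "replied") == b)) = false := by
        rcases Bool.eq_false_or_eq_true (statusSentLike (pyStatus c)) with h | h
        · exact absurd h hsl
        · rw [h]; simp
      rw [if_neg hsl, hpred]
      simp only [Bool.false_eq_true, if_false]
      ring

-- split a countP on the last conjunct
theorem countP_split {α : Type} (l : List α) (p q : α → Bool) :
    l.countP (fun x => p x && q x) + l.countP (fun x => p x && !q x) = l.countP p := by
  induction l with
  | nil => simp
  | cons a l ih =>
    simp only [List.countP_cons]
    by_cases hp : p a = true <;> by_cases hq : q a = true <;> simp [hp, hq] <;> omega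

-- the "sent" count of segment s computed by B equals A's double-filter length
theorem sent_nat (communications : List (List (String × String))) (s : String)
    (h1 : ((MONTHLY_OUTREACH_GOALS.map Prod.fst).count s) = 1) :
    ((communications.filter (fun c => PySem.Str.isIn s (pyNotes c))).filter
        (fun c => statusSentLike (pyStatus c))).length
      = (communications.foldl eventStep []).count (s, false)
        + (communications.foldl eventStep []).count (s, true) := by
  rw [events_count, events_count, h1]
  simp only [List.count_nil, Nat.zero_add, Nat.one_mul]
  rw [← List.countP_eq_length_filter, List.countP_filter]
  rw [← countP_split communications
    (fun c => statusSentLike (pyStatus c) && PySem.Str.isIn s (pyNotes c))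
    (fun c => pyStatus c == some "replied")]
  have hl : ∀ c, ((statusSentLike (pyStatus c) && PySem.Str.isIn s (pyNotes c))
      && !(pyStatus c == some "replied"))
      = (statusSentLike (pyStatus c) && PySem.Str.isIn s (pyNotes c)
          && ((pyStatus c == some "replied") == false)) := by
    intro c; cases h : (pyStatus c == some "replied") <;> simp [Bool.and_assoc]
  have hr : ∀ c, ((statusSentLike (pyStatus c) && PySem.Str.isIn s (pyNotes c))
      && (pyStatus c == some "replied"))
      = (statusSentLike (pyStatus c) && PySem.Str.isIn s (pyNotes c)
          && ((pyStatus c == some "replied") == true)) := by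
    intro c; cases h : (pyStatus c == some "replied") <;> simp [Bool.and_assoc]
  simp only [hl, hr]
  exact Nat.add_comm _ _

-- the "replied" count of segment s computed by B equals A's double-filter length
theorem replied_nat (communications : List (List (String × String))) (s : String)
    (h1 : ((MONTHLY_OUTREACH_GOALS.map Prod.fst).count s) = 1) :
    ((communications.filter (fun c => PySem.Str.isIn s (pyNotes c))).filter
        (fun c => pyStatus c == some "replied")).length
      = (communications.foldl eventStep []).count (s, true) := by
  rw [events_count, h1]
  simp only [List.count_nil, Nat.zero_add, Nat.one_mul]
  rw [← List.countP_eq_length_filter, List.countP_filter]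
  refine List.countP_congr (fun c _ => ?_)
  cases hr : (pyStatus c == some "replied")
  · simp [hr]
  · have hsl : statusSentLike (pyStatus c) = true := by
      unfold statusSentLike; simp_all
    simp [hr, hsl]

-- ===== VERDICT (by name: the statement is the Claim_ definition above) =====
theorem get_outreach_progress_spec : Claim_equal_get_outreach_progress := by
  intro communications _
  unfold Spec_get_outreach_progress get_outreach_progress get_outreach_progress_alt
  simp only [MONTHLY_OUTREACH_GOALS, List.foldl_cons, List.foldl_nil, List.map_cons,
    List.map_nil, List.nil_append, List.cons_append]
  have hs0 := sent_nat communications "kitchen_bathroom_providers" (by decide)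
  have hr0 := replied_nat communications "kitchen_bathroom_providers" (by decide)
  have hs1 := sent_nat communications "home_interior_bloggers" (by decide)
  have hr1 := replied_nat communications "home_interior_bloggers" (by decide)
  have hs2 := sent_nat communications "home_improvement_influencers" (by decide)
  have hr2 := replied_nat communications "home_improvement_influencers" (by decide)
  have hs3 := sent_nat communications "resource_page_targets" (by decide)
  have hr3 := replied_nat communications "resource_page_targets" (by decide)
  have hs4 := sent_nat communications "pr_journalists" (by decide)
  have hr4 := replied_nat communications "pr_journalists" (by decide)
  have hs5 := sent_nat communications "interior_designers" (by decide)
  have hr5 := replied_nat communications "interior_designers" (by decide)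
  norm_num
  norm_num at hs0 hr0 hs1 hr1 hs2 hr2 hs3 hr3 hs4 hr4 hs5 hr5
  omega
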